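-- pv_equiv track=rewrite | github.com/yavzali/AgenticSMFScraper | playwright_agent.py | _select_best_image_for_analysis
-- ===== SOURCE A (Python) =====
-- from typing import Dict, List, Optional, Tuple, Any
--
-- def _select_best_image_for_analysis(image_urls: List[str], retailer: str) -> Optional[str]:
--     """Select the best image for visual analysis"""
--
--     if not image_urls:
--         return None
--
--     # Scoring criteria for best analysis image
--     scored_images = []
--
--     for url in image_urls[:3]:  # Limit to first 3 to control costs
--         score = 0
--         url_lower = url.lower()
--
--         # Prefer main/front product shots
--         if any(keyword in url_lower for keyword in ['main', 'front', 'primary', 'hero']):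
--             score += 10
--
--         # Prefer high-res images
--         if any(keyword in url_lower for keyword in ['large', 'xl', 'full', 'zoom', '800', '1000']):
--             score += 5
--
--         # Avoid detail shots that might not show full garment
--         if any(keyword in url_lower for keyword in ['detail', 'close', 'fabric', 'texture']):
--             score -= 5
--
--         # Retailer-specific preferences
--         if retailer == 'asos' and '$XXL$' in url:
--             score += 3
--         elif retailer == 'uniqlo' and 'goods' in url:
--             score += 3
--         elif retailer == 'aritzia' and any(dim in url for dim in ['800', '1000']):
--             score += 3
--
--         scored_images.append((score, url))
--
--     # Return highest scoring image
--     if scored_images: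
--         scored_images.sort(reverse=True)
--         return scored_images[0][1]
--
--     return image_urls[0]  # Fallback to first image
-- ===== SOURCE B (Python) =====
-- from typing import List, Optional
--
-- _POS = ('main', 'front', 'primary', 'hero')
-- _RES = ('large', 'xl', 'full', 'zoom', '800', '1000')
-- _NEG = ('detail', 'close', 'fabric', 'texture')
--
--
-- def _score(url: str, retailer: str) -> int:
--     u = url.lower()
--     bonus = ((retailer == 'asos' and '$XXL$' in url)
--              or (retailer == 'uniqlo' and 'goods' in url)
--              or (retailer == 'aritzia' and ('800' in url or '1000' in url)))
--     return (10 * any(k in u for k in _POS)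
--             + 5 * any(k in u for k in _RES)
--             - 5 * any(k in u for k in _NEG)
--             + 3 * bonus)
--
--
-- def _select_best_image_for_analysis(image_urls: List[str], retailer: str) -> Optional[str]:
--     best = None
--     for url in image_urls[:3]:
--         cand = (_score(url, retailer), url)
--         if best is None or cand > best:
--             best = cand
--     return None if best is None else best[1]
-- ===== Notes on version B (the rewrite author's own statement) =====
-- stated objective: simpler
-- what changed: Replaces the scored_images list + sort(reverse=True) + index with a single-pass running-max over full (score,url) tuples, and folds the branchy score accumulation into one arithmetic expression; strict tuple > reproduces the sort's tie-break exactly.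
import Mathlib
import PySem

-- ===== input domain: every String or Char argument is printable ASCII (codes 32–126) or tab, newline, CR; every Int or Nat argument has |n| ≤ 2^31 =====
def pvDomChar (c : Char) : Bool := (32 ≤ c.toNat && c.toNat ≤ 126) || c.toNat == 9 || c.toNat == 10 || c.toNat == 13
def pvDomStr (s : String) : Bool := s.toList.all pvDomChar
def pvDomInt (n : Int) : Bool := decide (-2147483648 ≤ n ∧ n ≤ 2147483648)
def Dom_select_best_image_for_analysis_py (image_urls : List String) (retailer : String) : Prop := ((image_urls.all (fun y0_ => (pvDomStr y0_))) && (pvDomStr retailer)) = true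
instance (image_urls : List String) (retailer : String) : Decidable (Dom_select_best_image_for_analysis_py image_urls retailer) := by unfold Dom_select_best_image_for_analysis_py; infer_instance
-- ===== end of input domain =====

-- B replaces the scored-list + sort(reverse=True) + [0] with a single running-max pass over
-- (score, url) tuples and one arithmetic score expression (objective: simpler).

-- ===== PORT A =====
-- A's per-url score accumulation (the body of A's loop, as a helper)
def pvScoreA (url : String) (retailer : String) : Int :=
  let score : Int := 0
  let url_lower := PySem.Str.lower url
  let score := if ["main", "front", "primary", "hero"].any (fun k => PySem.Str.isIn k url_lower) then score + 10 else score
  let score := if ["large", "xl", "full", "zoom", "800", "1000"].any (fun k => PySem.Str.isIn k url_lower) then score + 5 else score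
  let score := if ["detail", "close", "fabric", "texture"].any (fun k => PySem.Str.isIn k url_lower) then score - 5 else score
  let score :=
    if retailer = "asos" ∧ PySem.Str.isIn "$XXL$" url then score + 3
    else if retailer = "uniqlo" ∧ PySem.Str.isIn "goods" url then score + 3
    else if retailer = "aritzia" ∧ ["800", "1000"].any (fun d => PySem.Str.isIn d url) then score + 3
    else score
  score

def select_best_image_for_analysis_py (image_urls : List String) (retailer : String) : Option String :=
  if image_urls = [] then none
  else
    let scored_images : List (Int × String) :=
      (PySem.List.slice image_urls none (some 3)).foldl
        (fun acc url => acc ++ [(pvScoreA url retailer, url)]) []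
    if scored_images ≠ [] then
      -- scored_images.sort(reverse=True) on (int, str) tuples, then [0][1]
      (PySem.List.pyGet? (PySem.List.sorted2 scored_images Prod.fst Prod.snd true) 0).map Prod.snd
    else
      PySem.List.pyGet? image_urls 0

-- ===== PORT B =====
def pvScoreB (url : String) (retailer : String) : Int :=
  let u := PySem.Str.lower url
  let bonus :=
    (retailer = "asos" ∧ PySem.Str.isIn "$XXL$" url) ∨
    (retailer = "uniqlo" ∧ PySem.Str.isIn "goods" url) ∨
    (retailer = "aritzia" ∧ (PySem.Str.isIn "800" url ∨ PySem.Str.isIn "1000" url))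
  10 * (if ["main", "front", "primary", "hero"].any (fun k => PySem.Str.isIn k u) then 1 else 0)
    + 5 * (if ["large", "xl", "full", "zoom", "800", "1000"].any (fun k => PySem.Str.isIn k u) then 1 else 0)
    - 5 * (if ["detail", "close", "fabric", "texture"].any (fun k => PySem.Str.isIn k u) then 1 else 0)
    + 3 * (if bonus then 1 else 0)

def select_best_image_for_analysis_py_alt (image_urls : List String) (retailer : String) : Option String :=
  let best : Option (Int × String) :=
    (PySem.List.slice image_urls none (some 3)).foldl
      (fun best url =>
        let cand := (pvScoreB url retailer, url)
        match best with
        | none => some cand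
        | some b => if b.1 < cand.1 ∨ (b.1 = cand.1 ∧ b.2 < cand.2) then some cand else some b)
      none
  match best with
  | none => none
  | some b => some b.2

-- ===== PRECONDITION & SPEC =====
def Spec_select_best_image_for_analysis_py (image_urls : List String) (retailer : String) (out : Option String) : Prop := out = select_best_image_for_analysis_py_alt image_urls retailer
instance (image_urls : List String) (retailer : String) (out : Option String) : Decidable (Spec_select_best_image_for_analysis_py image_urls retailer out) := by unfold Spec_select_best_image_for_analysis_py; infer_instance

-- ===== CLAIM (what is proved, stated in full; the proofs are below) =====
def Claim_equal_select_best_image_for_analysis_py : Prop := ∀ (image_urls : List String) (retailer : String), Dom_select_best_image_for_analysis_py image_urls retailer → Spec_select_best_image_for_analysis_py image_urls retailer (select_best_image_for_analysis_py image_urls retailer)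

-- ===== LEMMAS AND PROOFS =====

-- the if-chain of retailer bonuses is an arithmetic +3 on the disjunction
theorem pvChain (s : Int) (Q1 Q2 Q3 : Prop) [Decidable Q1] [Decidable Q2] [Decidable Q3] :
    (if Q1 then s + 3 else if Q2 then s + 3 else if Q3 then s + 3 else s)
      = s + 3 * (if Q1 ∨ Q2 ∨ Q3 then 1 else 0) := by
  split_ifs <;> first | omega | tauto

-- the two score computations agree
theorem pvScore_eq (url retailer : String) : pvScoreA url retailer = pvScoreB url retailer := by
  simp only [pvScoreA, pvScoreB, List.any_cons, List.any_nil, Bool.or_eq_true, Bool.or_false]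
  rw [pvChain]
  congr 1
  split_ifs <;> omega

-- head of an insertBy-fold is the running "best" under the `before` test
theorem head_foldl_insertBy {α : Type} (before : α → α → Bool) :
    ∀ (ps : List α) (acc : List α),
      (ps.foldl (fun acc x => PySem.List.insertBy before x acc) acc).head? =
        ps.foldl (fun h x =>
          match h with
          | none => some x
          | some m => if before x m then some x else some m) acc.head? := by
  intro ps
  induction ps with
  | nil => intro acc; rfl
  | cons x t ih =>
      intro acc
      simp only [List.foldl_cons, ih]
      congr 1
      cases acc with
      | nil => rfl
      | cons m r =>
          show (PySem.List.insertBy before x (m :: r)).head?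
              = if before x m then some x else some m
          simp only [PySem.List.insertBy]; split <;> rfl

-- the sorted2 comparison agrees with B's explicit lexicographic test
theorem pvStep_eq (m : Int × String) (s : Int) (y : String) :
    (if (decide (m.1 < s) || (!decide (s < m.1) && decide (m.2 < y))) = true
      then (some (s, y) : Option (Int × String)) else some m) =
    (if m.1 < s ∨ (m.1 = s ∧ m.2 < y) then some (s, y) else some m) := by
  rcases lt_trichotomy m.1 s with h | h | h
  · simp [h]
  · simp [h]
  · simp [not_lt_of_gt h, h]
    intro h'; omega

-- ===== VERDICT (by name: the statement is the Claim_ definition above) =====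
theorem select_best_image_for_analysis_py_spec : Claim_equal_select_best_image_for_analysis_py := by
  intro image_urls retailer _
  unfold Spec_select_best_image_for_analysis_py
  unfold select_best_image_for_analysis_py select_best_image_for_analysis_py_alt
  by_cases h : image_urls = []
  · subst h; rfl
  · have h3 : PySem.List.slice image_urls none (some 3) = image_urls.take 3 := by
      have := PySem.List.slice_to_natCast (xs := image_urls) (b := 3)
      simpa using this
    simp only [h, if_false, h3, PySem.List.foldl_append_singleton_eq_map, List.nil_append]
    simp only [pvScore_eq]
    have hne : List.map (fun x => (pvScoreB x retailer, x)) (List.take 3 image_urls) ≠ [] := by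
      simp [List.take_eq_nil_iff, h]
    rw [if_pos hne]
    rw [PySem.List.pyGet?_zero, ← List.head?_eq_getElem?]
    simp only [PySem.List.sorted2]
    rw [head_foldl_insertBy]
    rw [List.foldl_map]
    simp only [if_true, List.head?_nil, pvStep_eq]
    have hm : ∀ r : Option (Int × String),
        (match r with | none => (none : Option String) | some b => some b.2)
          = Option.map Prod.snd r := by
      intro r; cases r <;> rfl
    rw [hm]
    refine congrArg (Option.map Prod.snd) (PySem.List.foldl_congr_mem _ _ _ _ ?_)
    intro acc y _
    cases acc with
    | none => rfl
    | some m => dsimp only
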